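-- pv_equiv track=rewrite | github.com/ThalesDEngineer/HackerRank | Python/BetweenTwoSets.py | getTotalX
-- ===== SOURCE A (Python) =====
-- def getTotalX(a, b):
--     count = 0
--     for i in range(1, 101):
--         factora = [i % x for x in a]
--         factorb = [y % i for y in b]
--         if sum(factora) == 0 and sum(factorb) == 0:
--             count +=1
--     return count
-- ===== SOURCE B (Python) =====
-- from functools import reduce
-- from math import gcd, lcm
--
--
-- def getTotalX(a, b):
--     la = 1
--     for x in a:
--         la = lcm(la, x)
--         if la > 100:
--             # no i in 1..100 can be a multiple of la, so nothing is counted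
--             return 0
--     gb = reduce(gcd, b, 0)
--     return sum(1 for i in range(1, 101) if i % la == 0 and gb % i == 0)
-- ===== Notes on version B (the rewrite author's own statement) =====
-- stated objective: faster
-- what changed: B folds a into a single running lcm (bailing out with 0 once it exceeds 100, since only i in 1..100 can be counted) and b into a single gcd, then makes one 1..100 divisibility scan against these two aggregates, instead of rebuilding two remainder lists over all of a and b for every i.
-- outside the precondition, e.g. on getTotalX([3, -2], [42]): A returns 4, B returns 2; on getTotalX([0], [6]): A raises ZeroDivisionError, B raises ZeroDivisionError
import Mathlib
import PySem

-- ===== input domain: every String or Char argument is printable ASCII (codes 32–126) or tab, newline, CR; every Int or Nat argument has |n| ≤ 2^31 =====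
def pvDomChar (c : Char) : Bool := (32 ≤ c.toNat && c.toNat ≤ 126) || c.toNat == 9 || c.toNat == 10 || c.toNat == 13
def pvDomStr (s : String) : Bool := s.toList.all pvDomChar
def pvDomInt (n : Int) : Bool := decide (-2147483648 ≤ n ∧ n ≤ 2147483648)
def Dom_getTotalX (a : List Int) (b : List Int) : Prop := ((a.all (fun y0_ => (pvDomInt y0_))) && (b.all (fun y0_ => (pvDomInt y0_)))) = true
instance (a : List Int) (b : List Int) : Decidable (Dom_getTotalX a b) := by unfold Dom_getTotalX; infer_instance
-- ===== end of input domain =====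

-- B folds a into one lcm and b into one gcd once, then does a single 1..100 divisibility
-- scan against those two aggregates, instead of rebuilding two remainder lists per i.

-- ===== PORT A =====
def getTotalX (a : List Int) (b : List Int) : Int :=
  (PySem.List.pyRange 1 101 1).foldl
    (fun count i =>
      let factora := a.map (fun x => PySem.Int.mod i x)
      let factorb := b.map (fun y => PySem.Int.mod y i)
      if factora.sum = 0 ∧ factorb.sum = 0 then count + 1 else count)
    0

-- ===== PORT B =====
-- B's capped lcm loop: 'none' is the early 'return 0' taken when the running lcm exceeds 100
def pvLcmCap : List Int → Int → Option Int
  | [], la => some la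
  | x :: xs, la =>
    let la' := (Int.lcm la x : Int)
    if la' > 100 then none else pvLcmCap xs la'

def getTotalX_alt (a : List Int) (b : List Int) : Int :=
  match pvLcmCap a 1 with
  | none => 0
  | some la =>
    let gb := b.foldl (fun acc y => (Int.gcd acc y : Int)) 0
    ((PySem.List.pyRange 1 101 1).countP
      (fun i => PySem.Int.mod i la == 0 && PySem.Int.mod gb i == 0) : Int)

-- ===== PRECONDITION & SPEC =====
-- Pre_ excludes lists a containing 0 (A raises ZeroDivisionError on 'i % 0') and lists a
-- with elements of both signs, on which A's sum-of-remainders test can cancel remainders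
-- of opposite signs and accidentally count non-divisors.
def Pre_getTotalX (a : List Int) (b : List Int) : Prop :=
  (∀ x ∈ a, 0 < x) ∨ (∀ x ∈ a, x < 0)
instance (a : List Int) (b : List Int) : Decidable (Pre_getTotalX a b) := by
  unfold Pre_getTotalX; infer_instance

def pvWitness_getTotalX : List Int × List Int := ([2, 6], [24, 48])

def Spec_getTotalX (a : List Int) (b : List Int) (out : Int) : Prop := out = getTotalX_alt a b
instance (a : List Int) (b : List Int) (out : Int) : Decidable (Spec_getTotalX a b out) := by
  unfold Spec_getTotalX; infer_instance

-- ===== CLAIM (what is proved, stated in full; the proofs are below) =====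
def Claim_equal_getTotalX : Prop :=
  ∀ (a : List Int) (b : List Int), Dom_getTotalX a b → Pre_getTotalX a b →
    Spec_getTotalX a b (getTotalX a b)

-- ===== LEMMAS AND PROOFS =====

-- a sum of nonnegative integers is zero iff every term is zero
theorem pv_sum_eq_zero_nonneg (l : List Int) (h : ∀ t ∈ l, 0 ≤ t) :
    l.sum = 0 ↔ ∀ t ∈ l, t = 0 := by
  induction l with
  | nil => simp
  | cons x xs ih =>
    have hx := h x (List.mem_cons_self)
    have hxs : 0 ≤ xs.sum := List.sum_nonneg (fun t ht => h t (List.mem_cons_of_mem _ ht))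
    simp only [List.sum_cons, List.mem_cons]
    constructor
    · intro h0
      have hx0 : x = 0 := by omega
      have := (ih (fun t ht => h t (List.mem_cons_of_mem _ ht))).1 (by omega)
      intro t ht
      rcases ht with rfl | ht
      · exact hx0
      · exact this t ht
    · intro h0
      have := (ih (fun t ht => h t (List.mem_cons_of_mem _ ht))).2
        (fun t ht => h0 t (Or.inr ht))
      have := h0 x (Or.inl rfl)
      omega

-- negating every term negates the sum
theorem pv_sum_map_neg (l : List Int) : (l.map (fun t => -t)).sum = -l.sum := by
  induction l with
  | nil => simp
  | cons x xs ih => simp only [List.map_cons, List.sum_cons, ih]; ring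

-- a sum of nonpositive integers is zero iff every term is zero
theorem pv_sum_eq_zero_nonpos (l : List Int) (h : ∀ t ∈ l, t ≤ 0) :
    l.sum = 0 ↔ ∀ t ∈ l, t = 0 := by
  induction l with
  | nil => simp
  | cons x xs ih =>
    have hx := h x (List.mem_cons_self)
    have hxs : xs.sum ≤ 0 := by
      have : (0 : Int) ≤ (xs.map (fun t => -t)).sum :=
        List.sum_nonneg (by
          intro t ht
          rcases List.mem_map.1 ht with ⟨u, hu, rfl⟩
          have := h u (List.mem_cons_of_mem _ hu); omega)
      have hmap := pv_sum_map_neg xs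
      omega
    simp only [List.sum_cons, List.mem_cons]
    constructor
    · intro h0
      have hx0 : x = 0 := by omega
      have := (ih (fun t ht => h t (List.mem_cons_of_mem _ ht))).1 (by omega)
      intro t ht
      rcases ht with rfl | ht
      · exact hx0
      · exact this t ht
    · intro h0
      have := (ih (fun t ht => h t (List.mem_cons_of_mem _ ht))).2
        (fun t ht => h0 t (Or.inr ht))
      have := h0 x (Or.inl rfl)
      omega

-- A's first test: on a same-sign list, the remainder sum vanishes iff every element divides i
theorem pv_suma_iff (a : List Int) (i : Int)
    (hp : (∀ x ∈ a, 0 < x) ∨ (∀ x ∈ a, x < 0)) :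
    (a.map (fun x => PySem.Int.mod i x)).sum = 0 ↔ ∀ x ∈ a, x ∣ i := by
  have key : (a.map (fun x => PySem.Int.mod i x)).sum = 0 ↔
      ∀ t ∈ a.map (fun x => PySem.Int.mod i x), t = 0 := by
    rcases hp with hp | hp
    · exact pv_sum_eq_zero_nonneg _ (by
        intro t ht
        rcases List.mem_map.1 ht with ⟨x, hx, rfl⟩
        exact PySem.Int.mod_nonneg i (hp x hx))
    · exact pv_sum_eq_zero_nonpos _ (by
        intro t ht
        rcases List.mem_map.1 ht with ⟨x, hx, rfl⟩
        exact (PySem.Int.mod_neg_bounds i (hp x hx)).2)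
  rw [key]
  constructor
  · intro h x hx
    exact (PySem.Int.mod_eq_zero_iff_dvd i x).1 (h _ (List.mem_map.2 ⟨x, hx, rfl⟩))
  · intro h t ht
    rcases List.mem_map.1 ht with ⟨x, hx, rfl⟩
    exact (PySem.Int.mod_eq_zero_iff_dvd i x).2 (h x hx)

-- A's second test: for positive i the remainder sum over b vanishes iff i divides every element
theorem pv_sumb_iff (b : List Int) (i : Int) (hi : 0 < i) :
    (b.map (fun y => PySem.Int.mod y i)).sum = 0 ↔ ∀ y ∈ b, i ∣ y := by
  rw [pv_sum_eq_zero_nonneg _ (by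
    intro t ht
    rcases List.mem_map.1 ht with ⟨y, hy, rfl⟩
    exact PySem.Int.mod_nonneg y hi)]
  constructor
  · intro h y hy
    exact (PySem.Int.mod_eq_zero_iff_dvd y i).1 (h _ (List.mem_map.2 ⟨y, hy, rfl⟩))
  · intro h t ht
    rcases List.mem_map.1 ht with ⟨y, hy, rfl⟩
    exact (PySem.Int.mod_eq_zero_iff_dvd y i).2 (h y hy)

-- the folded lcm divides i iff the seed and every list element do
theorem pv_foldl_lcm_dvd (l : List Int) (c i : Int) :
    (l.foldl (fun acc x => (Int.lcm acc x : Int)) c) ∣ i ↔ (c ∣ i ∧ ∀ x ∈ l, x ∣ i) := by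
  induction l generalizing c with
  | nil => simp
  | cons x xs ih =>
    simp only [List.foldl_cons, List.mem_cons]
    rw [ih]
    have : ((Int.lcm c x : Int)) ∣ i ↔ c ∣ i ∧ x ∣ i := by
      rw [Int.coe_lcm, lcm_dvd_iff]
    rw [this]
    constructor
    · rintro ⟨⟨hc, hx⟩, hxs⟩
      exact ⟨hc, fun y hy => by rcases hy with rfl | hy; exact hx; exact hxs y hy⟩
    · rintro ⟨hc, h⟩
      exact ⟨⟨hc, h x (Or.inl rfl)⟩, fun y hy => h y (Or.inr hy)⟩

-- i divides the folded gcd iff it divides the seed and every list element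
theorem pv_foldl_gcd_dvd (l : List Int) (c i : Int) :
    i ∣ (l.foldl (fun acc y => (Int.gcd acc y : Int)) c) ↔ (i ∣ c ∧ ∀ y ∈ l, i ∣ y) := by
  induction l generalizing c with
  | nil => simp
  | cons x xs ih =>
    simp only [List.foldl_cons, List.mem_cons]
    rw [ih]
    have : i ∣ ((Int.gcd c x : Int)) ↔ i ∣ c ∧ i ∣ x := by
      rw [Int.coe_gcd, dvd_gcd_iff]
    rw [this]
    constructor
    · rintro ⟨⟨hc, hx⟩, hxs⟩
      exact ⟨hc, fun y hy => by rcases hy with rfl | hy; exact hx; exact hxs y hy⟩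
    · rintro ⟨hc, h⟩
      exact ⟨⟨hc, h x (Or.inl rfl)⟩, fun y hy => h y (Or.inr hy)⟩

-- counting fold equals countP when the two tests agree on the traversed list
theorem pv_foldl_count (l : List Int) (P : Int → Prop) [DecidablePred P]
    (q : Int → Bool) (h : ∀ i ∈ l, (P i ↔ q i = true)) (c : Int) :
    l.foldl (fun count i => if P i then count + 1 else count) c = c + (l.countP q : Int) := by
  induction l generalizing c with
  | nil => simp
  | cons x xs ih =>
    simp only [List.foldl_cons, List.countP_cons]
    rw [ih (fun i hi => h i (List.mem_cons_of_mem _ hi))]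
    by_cases hx : P x
    · rw [if_pos hx, if_pos ((h x List.mem_cons_self).1 hx)]
      push_cast; ring
    · rw [if_neg hx, if_neg (fun hq => hx ((h x List.mem_cons_self).2 hq))]
      simp

-- when the capped loop completes, its result is exactly the full lcm fold
theorem pv_lcmCap_some (l : List Int) (c r : Int) (h : pvLcmCap l c = some r) :
    r = l.foldl (fun acc x => (Int.lcm acc x : Int)) c := by
  induction l generalizing c with
  | nil => simp [pvLcmCap] at h; simp [h]
  | cons x xs ih =>
    simp only [pvLcmCap] at h
    split at h
    · exact absurd h (by simp)
    · exact ih _ h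

-- when the capped loop bails out, no i in 1..100 is a common multiple of c and l
theorem pv_lcmCap_none (l : List Int) (c : Int) (h : pvLcmCap l c = none) (i : Int)
    (h1 : 1 ≤ i) (h100 : i ≤ 100) : ¬ (c ∣ i ∧ ∀ x ∈ l, x ∣ i) := by
  induction l generalizing c with
  | nil => simp [pvLcmCap] at h
  | cons x xs ih =>
    rintro ⟨hc, hl⟩
    simp only [pvLcmCap] at h
    split at h
    · rename_i hgt
      have hdvd : ((Int.lcm c x : Int)) ∣ i := by
        rw [Int.coe_lcm, lcm_dvd_iff]
        exact ⟨hc, hl x (List.mem_cons_self)⟩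
      have := Int.le_of_dvd (by omega) hdvd
      omega
    · exact ih _ h ⟨by
        rw [Int.coe_lcm, lcm_dvd_iff]
        exact ⟨hc, hl x (List.mem_cons_self)⟩,
        fun y hy => hl y (List.mem_cons_of_mem _ hy)⟩

-- ===== VERDICT (by name: the statement is the Claim_ definition above) =====
theorem getTotalX_spec : Claim_equal_getTotalX := by
  intro a b _hdom hpre
  unfold Spec_getTotalX getTotalX getTotalX_alt
  cases hcap : pvLcmCap a 1 with
  | none =>
    rw [pv_foldl_count (PySem.List.pyRange 1 101 1) _ (fun _ => false)
      (by
        intro i hi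
        have hi1 : 1 ≤ i ∧ i < 101 := PySem.List.mem_pyRange_one.1 hi
        simp only [Bool.false_eq_true, iff_false]
        intro ⟨hsa, hsb⟩
        exact pv_lcmCap_none a 1 hcap i (by omega) (by omega)
          ⟨one_dvd i, (pv_suma_iff a i hpre).1 hsa⟩)
      0]
    simp
  | some la =>
    have hla := pv_lcmCap_some a 1 la hcap
    rw [pv_foldl_count (PySem.List.pyRange 1 101 1) _
      (fun i => PySem.Int.mod i la == 0 &&
        PySem.Int.mod (b.foldl (fun acc y => (Int.gcd acc y : Int)) 0) i == 0)
      (by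
        intro i hi
        have hi1 : 1 ≤ i ∧ i < 101 := PySem.List.mem_pyRange_one.1 hi
        simp only [Bool.and_eq_true, beq_iff_eq]
        rw [pv_suma_iff a i hpre, pv_sumb_iff b i (by omega),
          PySem.Int.mod_eq_zero_iff_dvd, PySem.Int.mod_eq_zero_iff_dvd,
          hla, pv_foldl_lcm_dvd, pv_foldl_gcd_dvd]
        constructor
        · rintro ⟨ha, hb⟩
          exact ⟨⟨one_dvd i, ha⟩, ⟨dvd_zero i, hb⟩⟩
        · rintro ⟨⟨_, ha⟩, ⟨_, hb⟩⟩
          exact ⟨ha, hb⟩)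
      0]
    simp
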